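-- pv_equiv track=rewrite | github.com/daniel-pg/mc102-1s2020 | tarefa14/menor_ausente.py | encontra_menor_ausente
-- ===== SOURCE A (Python) =====
-- def encontra_menor_ausente(sequencia, idx):
--     if idx < len(sequencia) - 1:
--         if sequencia[idx] == sequencia[idx + 1] - 1:
--             return encontra_menor_ausente(sequencia, idx + 1)
--         else:
--             return sequencia[idx] + 1
--     else:
--         return -1
-- ===== SOURCE B (Python) =====
-- def encontra_menor_ausente(sequencia, idx):
--     for k in range(idx, len(sequencia) - 1):
--         if sequencia[k] != sequencia[k + 1] - 1:
--             return sequencia[k] + 1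
--     return -1
-- ===== Notes on version B (the rewrite author's own statement) =====
-- stated objective: idiomatic
-- what changed: Replaces A's tail recursion with a single iterative for-loop over range(idx, n-1) with an early return; same O(n) scan but no recursion depth and no repeated len() calls.
import Mathlib
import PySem

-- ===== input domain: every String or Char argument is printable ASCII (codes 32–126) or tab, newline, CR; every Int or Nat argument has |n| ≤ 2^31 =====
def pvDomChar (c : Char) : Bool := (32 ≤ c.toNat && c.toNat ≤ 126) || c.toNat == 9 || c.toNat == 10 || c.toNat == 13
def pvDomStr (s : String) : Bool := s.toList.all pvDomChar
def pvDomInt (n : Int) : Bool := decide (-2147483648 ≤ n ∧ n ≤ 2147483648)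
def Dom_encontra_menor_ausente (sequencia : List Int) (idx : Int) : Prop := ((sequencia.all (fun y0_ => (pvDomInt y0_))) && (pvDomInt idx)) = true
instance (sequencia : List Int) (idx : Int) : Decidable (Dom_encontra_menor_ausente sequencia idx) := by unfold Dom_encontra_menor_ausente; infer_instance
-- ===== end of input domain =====

-- B replaces A's tail recursion with one iterative loop over range(idx, n-1) with an early return (same O(n) cost; iterative decomposition).

-- ===== PORT A =====
-- literal port of A's recursion; out-of-range indexing (excluded by Pre_) is totalized with .getD 0
def encontra_menor_ausente (sequencia : List Int) (idx : Int) : Int :=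
  if idx < (sequencia.length : Int) - 1 then
    if (PySem.List.pyGet? sequencia idx).getD 0 = (PySem.List.pyGet? sequencia (idx + 1)).getD 0 - 1 then
      encontra_menor_ausente sequencia (idx + 1)
    else
      (PySem.List.pyGet? sequencia idx).getD 0 + 1
  else
    -1
termination_by ((sequencia.length : Int) - 1 - idx).toNat
decreasing_by omega

-- ===== PORT B =====
-- the body of Source B's for-loop, consuming the list range(idx, n-1); early return = stopping the recursion
def emaLoop (sequencia : List Int) : List Int → Int
  | [] => -1
  | k :: ks =>
      if (PySem.List.pyGet? sequencia k).getD 0 ≠ (PySem.List.pyGet? sequencia (k + 1)).getD 0 - 1 then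
        (PySem.List.pyGet? sequencia k).getD 0 + 1
      else
        emaLoop sequencia ks

def encontra_menor_ausente_alt (sequencia : List Int) (idx : Int) : Int :=
  emaLoop sequencia (PySem.List.pyRange idx ((sequencia.length : Int) - 1) 1)

-- ===== PRECONDITION & SPEC =====
-- Pre_ excludes exactly the inputs where Python A raises IndexError: idx < len-1 together with idx < -len
def Pre_encontra_menor_ausente (sequencia : List Int) (idx : Int) : Prop :=
  (sequencia.length : Int) - 1 ≤ idx ∨ -(sequencia.length : Int) ≤ idx
instance (sequencia : List Int) (idx : Int) : Decidable (Pre_encontra_menor_ausente sequencia idx) := by unfold Pre_encontra_menor_ausente; infer_instance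
def pvWitness_encontra_menor_ausente : List Int × Int := ([1, 2, 4], 0)
def Spec_encontra_menor_ausente (sequencia : List Int) (idx : Int) (out : Int) : Prop := out = encontra_menor_ausente_alt sequencia idx
instance (sequencia : List Int) (idx : Int) (out : Int) : Decidable (Spec_encontra_menor_ausente sequencia idx out) := by unfold Spec_encontra_menor_ausente; infer_instance

-- ===== CLAIM (what is proved, stated in full; the proofs are below) =====
def Claim_equal_encontra_menor_ausente : Prop := ∀ (sequencia : List Int) (idx : Int), Dom_encontra_menor_ausente sequencia idx → Pre_encontra_menor_ausente sequencia idx → Spec_encontra_menor_ausente sequencia idx (encontra_menor_ausente sequencia idx)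

-- ===== LEMMAS AND PROOFS =====

theorem ema_eq_loop (sequencia : List Int) (idx : Int) :
    encontra_menor_ausente sequencia idx =
      emaLoop sequencia (PySem.List.pyRange idx ((sequencia.length : Int) - 1) 1) := by
  by_cases h : idx < (sequencia.length : Int) - 1
  · rw [encontra_menor_ausente, if_pos h, PySem.List.pyRange_one_cons h, emaLoop]
    by_cases hc : (PySem.List.pyGet? sequencia idx).getD 0 = (PySem.List.pyGet? sequencia (idx + 1)).getD 0 - 1
    · rw [if_pos hc, if_neg (by simpa using hc), ema_eq_loop sequencia (idx + 1)]
    · rw [if_neg hc, if_pos (by simpa using hc)]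
  · rw [encontra_menor_ausente, if_neg h, PySem.List.pyRange_one]
    have hz : (((sequencia.length : Int) - 1) - idx).toNat = 0 := by omega
    rw [hz]
    simp [emaLoop]
termination_by ((sequencia.length : Int) - 1 - idx).toNat
decreasing_by omega

-- ===== VERDICT (by name: the statement is the Claim_ definition above) =====
theorem encontra_menor_ausente_spec : Claim_equal_encontra_menor_ausente := by
  intro sequencia idx _ _
  unfold Spec_encontra_menor_ausente encontra_menor_ausente_alt
  exact ema_eq_loop sequencia idx
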